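-- pv_equiv track=rewrite | github.com/MSAILABS/trauma_project_backend | temp/process.py | get_sampling_rate_hospital_from_colnames
-- ===== SOURCE A (Python) =====
-- def get_sampling_rate_hospital_from_colnames(columns, inhosp=False):
--     # Default sampling rate based on context
--     default_rate = 250 if not inhosp else 240
--     sampling_rate = default_rate
--
--     # Named waveform groupings
--     arterial = {"AR1", "AR2", "AR3", "AR4"}
--     co2 = {f"CO2w_{i}" for i in range(1, 5)}
--     ecg = {f"ECG2w_{i}" for i in range(1, 5)}
--     icp = {f"ICP{i}w_{j}" for i in range(1, 5) for j in range(1, 5)}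
--     ppg = {f"PPGw_{i}" for i in range(1, 5)}
--     hosp='UMB'
--     if any(s.startswith("ETCO2") for s in columns):
--         sampling_rate = 125
--     elif any(s in {
--         "LeadI", "LeadII", "LeadIII", "Pads",
--         "LeadaVR", "LeadaVL", "LeadaVF", "ImpPads"
--     } for s in columns):
--         sampling_rate = 250
--         hosp='UPITT' # todo return hosp
--     elif any(s in arterial.union(co2).union(ecg).union(icp).union(ppg) for s in columns):
--         sampling_rate = default_rate
--
--     return sampling_rate, hosp
-- ===== SOURCE B (Python) =====
-- def get_sampling_rate_hospital_from_colnames(columns, inhosp=False):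
--     # Single pass: compute the highest-priority category rank seen, then map it.
--     upitt = {
--         "LeadI", "LeadII", "LeadIII", "Pads",
--         "LeadaVR", "LeadaVL", "LeadaVF", "ImpPads"
--     }
--     rank = 0
--     for s in columns:
--         if s.startswith("ETCO2"):
--             rank = max(rank, 3)
--         elif s in upitt:
--             rank = max(rank, 2)
--     if rank == 3:
--         return 125, 'UMB'
--     if rank == 2:
--         return 250, 'UPITT'
--     return (240 if inhosp else 250), 'UMB'
-- ===== Notes on version B (the rewrite author's own statement) =====
-- stated objective: faster
-- what changed: Replaces A's per-call construction of five waveform sets plus three sequential any(...) scans over columns with a single pass that keeps the maximum category rank per column (ETCO2 prefix = 3, UPITT lead = 2) and then maps the final rank to the (rate, hospital) pair.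
import Mathlib
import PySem

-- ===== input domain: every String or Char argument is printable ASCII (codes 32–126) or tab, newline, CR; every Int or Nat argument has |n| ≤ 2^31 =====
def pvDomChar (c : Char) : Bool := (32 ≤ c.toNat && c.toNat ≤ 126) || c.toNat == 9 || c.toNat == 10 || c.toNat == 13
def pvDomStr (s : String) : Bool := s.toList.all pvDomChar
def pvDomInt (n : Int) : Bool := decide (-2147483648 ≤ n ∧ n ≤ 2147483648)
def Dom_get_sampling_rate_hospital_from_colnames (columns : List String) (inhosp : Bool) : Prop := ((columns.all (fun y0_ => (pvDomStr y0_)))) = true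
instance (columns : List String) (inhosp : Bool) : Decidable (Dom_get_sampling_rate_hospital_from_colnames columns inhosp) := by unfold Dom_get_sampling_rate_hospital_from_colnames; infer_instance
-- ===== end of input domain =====

-- B replaces A's three sequential any-scans (and per-call waveform-set building) with a single max-rank pass over the columns (objective: faster, measured).


-- ===== PORT A =====
def get_sampling_rate_hospital_from_colnames (columns : List String) (inhosp : Bool) : Int × String :=
  let default_rate : Int := if !inhosp then 250 else 240
  let sampling_rate : Int := default_rate
  let arterial : PySem.Set String := PySem.Set.ofList ["AR1", "AR2", "AR3", "AR4"]
  let co2 : PySem.Set String := PySem.Set.ofList ((PySem.List.pyRange 1 5 1).map (fun i => "CO2w_" ++ PySem.Int.toStr i))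
  let ecg : PySem.Set String := PySem.Set.ofList ((PySem.List.pyRange 1 5 1).map (fun i => "ECG2w_" ++ PySem.Int.toStr i))
  let icp : PySem.Set String := PySem.Set.ofList ((PySem.List.pyRange 1 5 1).flatMap (fun i => (PySem.List.pyRange 1 5 1).map (fun j => "ICP" ++ PySem.Int.toStr i ++ "w_" ++ PySem.Int.toStr j)))
  let ppg : PySem.Set String := PySem.Set.ofList ((PySem.List.pyRange 1 5 1).map (fun i => "PPGw_" ++ PySem.Int.toStr i))
  let hosp : String := "UMB"
  if columns.any (fun s => PySem.Str.startswith s "ETCO2") then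
    (125, hosp)
  else if columns.any (fun s => PySem.Set.contains (PySem.Set.ofList
      ["LeadI", "LeadII", "LeadIII", "Pads", "LeadaVR", "LeadaVL", "LeadaVF", "ImpPads"]) s) then
    (250, "UPITT")
  else if columns.any (fun s => PySem.Set.contains
      (PySem.Set.union (PySem.Set.union (PySem.Set.union (PySem.Set.union arterial co2) ecg) icp) ppg) s) then
    (default_rate, hosp)
  else
    (sampling_rate, hosp)

-- ===== PORT B =====
-- B: one pass over columns keeping the maximum category rank, then map the rank.
def pvUpittLeads : PySem.Set String := PySem.Set.ofList
  ["LeadI", "LeadII", "LeadIII", "Pads", "LeadaVR", "LeadaVL", "LeadaVF", "ImpPads"]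

def get_sampling_rate_hospital_from_colnames_alt (columns : List String) (inhosp : Bool) : Int × String :=
  let rank : Int := columns.foldl (fun r s =>
    if PySem.Str.startswith s "ETCO2" then max r 3
    else if PySem.Set.contains pvUpittLeads s then max r 2
    else r) 0
  if rank == 3 then (125, "UMB")
  else if rank == 2 then (250, "UPITT")
  else ((if inhosp then 240 else 250), "UMB")

-- ===== PRECONDITION & SPEC =====
def Spec_get_sampling_rate_hospital_from_colnames (columns : List String) (inhosp : Bool) (out : Int × String) : Prop := out = get_sampling_rate_hospital_from_colnames_alt columns inhosp
instance (columns : List String) (inhosp : Bool) (out : Int × String) : Decidable (Spec_get_sampling_rate_hospital_from_colnames columns inhosp out) := by unfold Spec_get_sampling_rate_hospital_from_colnames; infer_instance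

-- ===== CLAIM (what is proved, stated in full; the proofs are below) =====
def Claim_equal_get_sampling_rate_hospital_from_colnames : Prop := ∀ (columns : List String) (inhosp : Bool), Dom_get_sampling_rate_hospital_from_colnames columns inhosp → Spec_get_sampling_rate_hospital_from_colnames columns inhosp (get_sampling_rate_hospital_from_colnames columns inhosp)

-- ===== LEMMAS AND PROOFS =====
-- The rank loop of B computes the max of the accumulator with the category rank of the list.
theorem pvRankLoop (cols : List String) : ∀ r : Int,
    cols.foldl (fun r s =>
      if PySem.Str.startswith s "ETCO2" then max r 3
      else if PySem.Set.contains pvUpittLeads s then max r 2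
      else r) r
    = (if cols.any (fun s => PySem.Str.startswith s "ETCO2") then max r 3
       else if cols.any (fun s => PySem.Set.contains pvUpittLeads s) then max r 2 else r) := by
  induction cols with
  | nil => intro r; simp only [List.foldl_nil, List.any_nil, Bool.false_eq_true, if_false]
  | cons s cs ih =>
    intro r
    by_cases he : PySem.Str.startswith s "ETCO2" <;>
      by_cases hu : PySem.Set.contains pvUpittLeads s <;>
        simp only [List.foldl_cons, List.any_cons, he, hu, Bool.true_or, Bool.false_or,
          if_true, if_false, ih] <;> split_ifs <;> first | contradiction | omega

-- ===== VERDICT (by name: the statement is the Claim_ definition above) =====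
theorem get_sampling_rate_hospital_from_colnames_spec : Claim_equal_get_sampling_rate_hospital_from_colnames := by
  intro columns inhosp _
  unfold Spec_get_sampling_rate_hospital_from_colnames
  unfold get_sampling_rate_hospital_from_colnames get_sampling_rate_hospital_from_colnames_alt
  rw [pvRankLoop]
  rw [show PySem.Set.ofList
      ["LeadI", "LeadII", "LeadIII", "Pads", "LeadaVR", "LeadaVL", "LeadaVF", "ImpPads"]
      = pvUpittLeads from rfl]
  cases he : columns.any (fun s => PySem.Str.startswith s "ETCO2") <;>
    cases hu : columns.any (fun s => PySem.Set.contains pvUpittLeads s) <;>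
      simp only [he, hu, Bool.false_eq_true, Bool.true_eq_false, if_true, if_false, ite_self] <;>
        cases inhosp <;> simp
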